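-- pv_equiv track=rewrite | github.com/bosl95/Algorithm | out/production/Algorithm/test/programmers/04.py | count
-- ===== SOURCE A (Python) =====
-- def count(str):
--     n = len(str)
--     ans = 0
--     for i in range(n-1):
--         for j in range(n-1, i, -1):
--             if str[i]!=str[j]:
--                 ans = max(j-i, ans)
--     return ans
-- ===== SOURCE B (Python) =====
-- def count(str):
--     # One pass per endpoint: a farthest differing pair can always be anchored
--     # at index 0 or index n-1, so O(n) instead of A's O(n^2).
--     n = len(str)
--     ans = 0
--     for j in range(n):
--         if str[j] != str[0]:
--             ans = max(j, ans)
--     for i in range(n):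
--         if str[i] != str[n - 1]:
--             ans = max(n - 1 - i, ans)
--     return ans
-- ===== Notes on version B (the rewrite author's own statement) =====
-- stated objective: faster
-- what changed: Replaces the all-pairs nested scan by two linear endpoint scans, using the fact that a farthest differing pair can always be anchored at index 0 or index n-1.
import Mathlib
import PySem

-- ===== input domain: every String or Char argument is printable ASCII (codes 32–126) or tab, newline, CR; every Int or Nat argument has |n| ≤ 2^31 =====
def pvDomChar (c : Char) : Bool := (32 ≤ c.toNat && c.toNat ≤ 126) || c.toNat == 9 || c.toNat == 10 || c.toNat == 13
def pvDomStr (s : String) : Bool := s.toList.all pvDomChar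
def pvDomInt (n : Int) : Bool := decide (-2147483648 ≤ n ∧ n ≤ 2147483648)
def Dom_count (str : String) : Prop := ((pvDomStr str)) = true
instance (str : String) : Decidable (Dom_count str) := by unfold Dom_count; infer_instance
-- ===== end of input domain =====

-- B replaces A's quadratic all-pairs scan by two linear scans anchored at the
-- endpoints (a farthest differing pair can always be anchored at index 0 or n-1).

-- ===== PORT A =====
def count (str : String) : Int :=
  let n : Int := PySem.Str.len str
  (PySem.List.pyRange 0 (n - 1) 1).foldl (fun ans i =>
    (PySem.List.pyRange (n - 1) i (-1)).foldl (fun ans j =>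
      if PySem.Str.pyGet? str i ≠ PySem.Str.pyGet? str j then max (j - i) ans else ans) ans) 0

-- ===== PORT B =====
def count_alt (str : String) : Int :=
  let n : Int := PySem.Str.len str
  let a1 : Int := (PySem.List.pyRange 0 n 1).foldl (fun ans j =>
      if PySem.Str.pyGet? str j ≠ PySem.Str.pyGet? str 0 then max j ans else ans) 0
  (PySem.List.pyRange 0 n 1).foldl (fun ans i =>
      if PySem.Str.pyGet? str i ≠ PySem.Str.pyGet? str (n - 1) then max (n - 1 - i) ans else ans) a1

-- ===== PRECONDITION & SPEC =====
def Spec_count (str : String) (out : Int) : Prop := out = count_alt str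
instance (str : String) (out : Int) : Decidable (Spec_count str out) := by unfold Spec_count; infer_instance

-- ===== CLAIM (what is proved, stated in full; the proofs are below) =====
def Claim_equal_count : Prop := ∀ (str : String), Dom_count str → Spec_count str (count str)

-- ===== LEMMAS AND PROOFS =====

/-- Bounds for a running-max loop guarded by a condition. -/
lemma maxif_bounds (p : Int → Prop) [DecidablePred p] (f : Int → Int) :
    ∀ (L : List Int) (a : Int),
      a ≤ L.foldl (fun acc x => if p x then max (f x) acc else acc) a ∧
      (∀ x ∈ L, p x → f x ≤ L.foldl (fun acc x => if p x then max (f x) acc else acc) a) ∧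
      (L.foldl (fun acc x => if p x then max (f x) acc else acc) a = a ∨
        ∃ x ∈ L, p x ∧ L.foldl (fun acc x => if p x then max (f x) acc else acc) a = f x)
  | [], a => by simp
  | x :: L, a => by
      obtain ⟨h1, h2, h3⟩ := maxif_bounds p f L (if p x then max (f x) a else a)
      refine ⟨le_trans ?_ h1, ?_, ?_⟩
      · split_ifs
        · exact le_max_right _ _
        · exact le_refl a
      · intro y hy hp
        rcases List.mem_cons.1 hy with rfl | hy
        · exact le_trans (by rw [if_pos hp]; exact le_max_left _ _) h1
        · exact h2 y hy hp
      · rcases h3 with h | ⟨y, hy, hp, he⟩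
        · by_cases hp : p x
          · rcases le_total (f x) a with hfa | hfa
            · have e : (if p x then max (f x) a else a) = a := by
                rw [if_pos hp, max_eq_right hfa]
              left; exact h.trans e
            · have e : (if p x then max (f x) a else a) = f x := by
                rw [if_pos hp, max_eq_left hfa]
              right; exact ⟨x, List.mem_cons_self, hp, h.trans e⟩
          · have e : (if p x then max (f x) a else a) = a := if_neg hp
            left; exact h.trans e
        · right; exact ⟨y, List.mem_cons_of_mem _ hy, hp, he⟩

/-- Bounds for A's nested loop (outer loop over `L`, inner countdown loop). -/
lemma nestedA_bounds (str : String) (n : Int) :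
    ∀ (L : List Int) (a : Int),
      a ≤ L.foldl (fun ans i =>
          (PySem.List.pyRange (n - 1) i (-1)).foldl (fun ans j =>
            if PySem.Str.pyGet? str i ≠ PySem.Str.pyGet? str j then max (j - i) ans else ans) ans) a ∧
      (∀ i ∈ L, ∀ j : Int, i < j → j ≤ n - 1 →
          PySem.Str.pyGet? str i ≠ PySem.Str.pyGet? str j →
          j - i ≤ L.foldl (fun ans i =>
            (PySem.List.pyRange (n - 1) i (-1)).foldl (fun ans j =>
              if PySem.Str.pyGet? str i ≠ PySem.Str.pyGet? str j then max (j - i) ans else ans) ans) a) ∧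
      (L.foldl (fun ans i =>
          (PySem.List.pyRange (n - 1) i (-1)).foldl (fun ans j =>
            if PySem.Str.pyGet? str i ≠ PySem.Str.pyGet? str j then max (j - i) ans else ans) ans) a = a ∨
        ∃ i ∈ L, ∃ j : Int, i < j ∧ j ≤ n - 1 ∧
          PySem.Str.pyGet? str i ≠ PySem.Str.pyGet? str j ∧
          L.foldl (fun ans i =>
            (PySem.List.pyRange (n - 1) i (-1)).foldl (fun ans j =>
              if PySem.Str.pyGet? str i ≠ PySem.Str.pyGet? str j then max (j - i) ans else ans) ans) a = j - i)
  | [], a => by simp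
  | i :: L, a => by
      obtain ⟨g1, g2, g3⟩ := maxif_bounds
        (fun j => PySem.Str.pyGet? str i ≠ PySem.Str.pyGet? str j)
        (fun j => j - i) (PySem.List.pyRange (n - 1) i (-1)) a
      obtain ⟨h1, h2, h3⟩ := nestedA_bounds str n L
        ((PySem.List.pyRange (n - 1) i (-1)).foldl (fun ans j =>
          if PySem.Str.pyGet? str i ≠ PySem.Str.pyGet? str j then max (j - i) ans else ans) a)
      refine ⟨le_trans g1 h1, ?_, ?_⟩
      · intro i' hi' j hij hjn hne
        rcases List.mem_cons.1 hi' with rfl | hi'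
        · exact le_trans (g2 j (by rw [PySem.List.mem_pyRange_neg_one]; omega) hne) h1
        · exact h2 i' hi' j hij hjn hne
      · rcases h3 with h | ⟨i', hi', j, hij, hjn, hne, he⟩
        · rcases g3 with g | ⟨j, hj, hne, ge⟩
          · left; exact h.trans g
          · right
            rw [PySem.List.mem_pyRange_neg_one] at hj
            exact ⟨i, List.mem_cons_self, j, by omega, by omega, hne, h.trans ge⟩
        · right; exact ⟨i', List.mem_cons_of_mem _ hi', j, hij, hjn, hne, he⟩

/-- Characterisation of A's result. -/
lemma count_bounds (str : String) :
    0 ≤ count str ∧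
    (∀ i j : Int, 0 ≤ i → i < j → j ≤ PySem.Str.len str - 1 →
        PySem.Str.pyGet? str i ≠ PySem.Str.pyGet? str j → j - i ≤ count str) ∧
    (count str = 0 ∨ ∃ i j : Int, 0 ≤ i ∧ i < j ∧ j ≤ PySem.Str.len str - 1 ∧
        PySem.Str.pyGet? str i ≠ PySem.Str.pyGet? str j ∧ count str = j - i) := by
  obtain ⟨h1, h2, h3⟩ := nestedA_bounds str (PySem.Str.len str)
      (PySem.List.pyRange 0 (PySem.Str.len str - 1) 1) 0
  refine ⟨h1, ?_, ?_⟩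
  · intro i j hi hij hjn hne
    exact h2 i (by rw [PySem.List.mem_pyRange_one]; omega) j hij hjn hne
  · rcases h3 with h | ⟨i, hi, j, hij, hjn, hne, he⟩
    · left; exact h
    · right
      rw [PySem.List.mem_pyRange_one] at hi
      exact ⟨i, j, hi.1, hij, hjn, hne, he⟩

/-- Characterisation of B's result. -/
lemma count_alt_bounds (str : String) :
    0 ≤ count_alt str ∧
    (∀ j : Int, 0 ≤ j → j < PySem.Str.len str →
        PySem.Str.pyGet? str j ≠ PySem.Str.pyGet? str 0 → j ≤ count_alt str) ∧
    (∀ i : Int, 0 ≤ i → i < PySem.Str.len str →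
        PySem.Str.pyGet? str i ≠ PySem.Str.pyGet? str (PySem.Str.len str - 1) →
        PySem.Str.len str - 1 - i ≤ count_alt str) ∧
    (count_alt str = 0 ∨
      (∃ j : Int, 0 ≤ j ∧ j < PySem.Str.len str ∧
        PySem.Str.pyGet? str j ≠ PySem.Str.pyGet? str 0 ∧ count_alt str = j) ∨
      (∃ i : Int, 0 ≤ i ∧ i < PySem.Str.len str ∧
        PySem.Str.pyGet? str i ≠ PySem.Str.pyGet? str (PySem.Str.len str - 1) ∧
        count_alt str = PySem.Str.len str - 1 - i)) := by
  obtain ⟨g1, g2, g3⟩ := maxif_bounds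
      (fun j => PySem.Str.pyGet? str j ≠ PySem.Str.pyGet? str 0)
      (fun j => j) (PySem.List.pyRange 0 (PySem.Str.len str) 1) 0
  obtain ⟨h1, h2, h3⟩ := maxif_bounds
      (fun i => PySem.Str.pyGet? str i ≠ PySem.Str.pyGet? str (PySem.Str.len str - 1))
      (fun i => PySem.Str.len str - 1 - i) (PySem.List.pyRange 0 (PySem.Str.len str) 1)
      ((PySem.List.pyRange 0 (PySem.Str.len str) 1).foldl (fun ans j =>
        if PySem.Str.pyGet? str j ≠ PySem.Str.pyGet? str 0 then max j ans else ans) 0)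
  refine ⟨le_trans g1 h1, ?_, ?_, ?_⟩
  · intro j hj hjn hne
    exact le_trans (g2 j (by rw [PySem.List.mem_pyRange_one]; omega) hne) h1
  · intro i hi hin hne
    exact h2 i (by rw [PySem.List.mem_pyRange_one]; omega) hne
  · rcases h3 with h | ⟨i, hi, hne, he⟩
    · rcases g3 with g | ⟨j, hj, hne, ge⟩
      · left; exact h.trans g
      · right; left
        rw [PySem.List.mem_pyRange_one] at hj
        exact ⟨j, hj.1, hj.2, hne, h.trans ge⟩
    · right; right
      rw [PySem.List.mem_pyRange_one] at hi
      exact ⟨i, hi.1, hi.2, hne, he⟩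

lemma count_eq_count_alt (str : String) : count str = count_alt str := by
  obtain ⟨a0, alb, aub⟩ := count_bounds str
  obtain ⟨b0, blb1, blb2, bub⟩ := count_alt_bounds str
  apply le_antisymm
  · rcases aub with h | ⟨i, j, hi, hij, hjn, hne, he⟩
    · rw [h]; exact b0
    · rw [he]
      by_cases hj0 : PySem.Str.pyGet? str j = PySem.Str.pyGet? str 0
      · -- s[j] = s[0], hence s[i] ≠ s[0]
        have hi0 : PySem.Str.pyGet? str i ≠ PySem.Str.pyGet? str 0 := fun h' => hne (h'.trans hj0.symm)
        by_cases hin : PySem.Str.pyGet? str i = PySem.Str.pyGet? str (PySem.Str.len str - 1)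
        · -- s[i] = s[n-1], hence s[n-1] ≠ s[0]: candidate j' = n-1 in B's first loop
          have hlast : PySem.Str.pyGet? str (PySem.Str.len str - 1) ≠ PySem.Str.pyGet? str 0 :=
            fun h' => hi0 (hin.trans h')
          have := blb1 (PySem.Str.len str - 1) (by omega) (by omega) hlast
          omega
        · have := blb2 i hi (by omega) hin
          omega
      · have := blb1 j (by omega) (by omega) hj0
        omega
  · rcases bub with h | ⟨j, hj, hjn, hne, he⟩ | ⟨i, hi, hin, hne, he⟩
    · rw [h]; exact a0
    · rw [he]
      have hj0 : 0 < j := by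
        rcases lt_or_eq_of_le hj with h' | h'
        · exact h'
        · exact absurd rfl (h' ▸ hne)
      have := alb 0 j le_rfl hj0 (by omega) (Ne.symm hne)
      omega
    · rw [he]
      have hin' : i ≠ PySem.Str.len str - 1 := fun h' => hne (by rw [h'])
      have hilt : i < PySem.Str.len str - 1 := by omega
      exact alb i (PySem.Str.len str - 1) hi hilt le_rfl hne

-- ===== VERDICT (by name: the statement is the Claim_ definition above) =====
theorem count_spec : Claim_equal_count := by
  intro str _
  unfold Spec_count
  exact count_eq_count_alt str
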